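-- pv_equiv track=rewrite | github.com/mdequeljoe/aoc2022 | day24.py | all_states
-- ===== SOURCE A (Python) =====
-- def move(coords, lx, ly):
--     new_coords = []
--     for x, y, d in coords:
--         if d == '>':
--             x += 1
--             if x == lx[1]:
--                 x = lx[0] + 1
--         elif d == '<':
--             x -= 1
--             if x == lx[0]:
--                 x = lx[1] - 1
--         elif d == '^':
--             y -= 1
--             if y == ly[0]:
--                 y = ly[1] - 1
--         elif d == 'v':
--             y += 1
--             if y == ly[1]:
--                 y = ly[0] + 1
--         new_coords.append((x, y, d))
--     return new_coords
--
-- def all_states(coords, lx, ly):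
--     s = []
--     s.append(coords)
--     while True:
--         coords = move(coords, lx, ly)
--         if coords in s:
--             break
--         s.append(coords)
--     return s
-- ===== SOURCE B (Python) =====
-- def move(coords, lx, ly):
--     # blizzard step via modular arithmetic on the interior band
--     out = []
--     for x, y, d in coords:
--         if d == '>' or d == '<':
--             w = lx[1] - lx[0] - 1
--             x = (x - lx[0] - 1 + (1 if d == '>' else -1)) % w + lx[0] + 1
--         elif d == '^' or d == 'v':
--             h = ly[1] - ly[0] - 1
--             y = (y - ly[0] - 1 + (1 if d == 'v' else -1)) % h + ly[0] + 1
--         out.append((x, y, d))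
--     return out
--
-- def all_states(coords, lx, ly):
--     # move is a bijection on the interior, so the orbit is a pure cycle:
--     # comparing against the initial state alone suffices.
--     s = [coords]
--     c = move(coords, lx, ly)
--     while c != coords:
--         s.append(c)
--         c = move(c, lx, ly)
--     return s
-- ===== Notes on version B (the rewrite author's own statement) =====
-- stated objective: alternative
-- what changed: B generates the same orbit but stops by comparing the current state only against the initial one (the blizzard step is a bijection on the interior, so the orbit is a pure cycle), instead of A's membership test against the whole list of previous states, and computes each wrap-around move by modular arithmetic instead of A's branch-and-reset. Pre_ excludes blizzards starting on/outside the walls or with degenerate/short wall lists, where A raises or diverges, or returns by an accidental rho-shaped orbit on which B's own loop never terminates.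
import Mathlib
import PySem

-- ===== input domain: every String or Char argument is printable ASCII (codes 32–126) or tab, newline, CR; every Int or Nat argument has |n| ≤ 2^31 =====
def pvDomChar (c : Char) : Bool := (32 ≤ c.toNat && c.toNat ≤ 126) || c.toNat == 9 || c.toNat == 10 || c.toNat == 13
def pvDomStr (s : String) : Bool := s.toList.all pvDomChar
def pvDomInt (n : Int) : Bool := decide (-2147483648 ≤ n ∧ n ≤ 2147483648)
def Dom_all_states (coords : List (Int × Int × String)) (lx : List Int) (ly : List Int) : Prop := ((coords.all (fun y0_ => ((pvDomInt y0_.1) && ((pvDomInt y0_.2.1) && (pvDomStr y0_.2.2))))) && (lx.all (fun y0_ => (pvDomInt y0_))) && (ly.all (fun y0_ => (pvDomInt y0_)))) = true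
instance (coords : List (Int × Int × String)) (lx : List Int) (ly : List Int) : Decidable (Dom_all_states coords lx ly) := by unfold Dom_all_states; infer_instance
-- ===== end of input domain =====

-- B (alternative algorithm, same cost in the measured range): it stops by comparing the current
-- state only against the initial one (the blizzard step is a bijection on the interior, so the
-- orbit is a pure cycle) and computes each wrap-around move by modular arithmetic.

-- shared totality helper: an upper bound on the number of generated states
-- (product of the per-blizzard cycle lengths); used only as recursion fuel.
def szC (lx ly : List Int) (c : Int × Int × String) : Nat :=
  if c.2.2 = ">" ∨ c.2.2 = "<" then (lx.getD 1 0 - lx.getD 0 0 - 1).toNat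
  else if c.2.2 = "^" ∨ c.2.2 = "v" then (ly.getD 1 0 - ly.getD 0 0 - 1).toNat
  else 1

def pvFuel (coords : List (Int × Int × String)) (lx ly : List Int) : Nat :=
  1 + (coords.map (szC lx ly)).prod

-- ===== PORT A =====
-- one blizzard step of A's `move` (branch-and-reset); none = IndexError on lx/ly
def stepA (lx ly : List Int) (c : Int × Int × String) : Option (Int × Int × String) :=
  match c with
  | (x, y, d) =>
    if d = ">" then
      match PySem.List.pyGet? lx 1 with
      | none => none
      | some l1 =>
        if x + 1 = l1 then
          match PySem.List.pyGet? lx 0 with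
          | none => none
          | some l0 => some (l0 + 1, y, d)
        else some (x + 1, y, d)
    else if d = "<" then
      match PySem.List.pyGet? lx 0 with
      | none => none
      | some l0 =>
        if x - 1 = l0 then
          match PySem.List.pyGet? lx 1 with
          | none => none
          | some l1 => some (l1 - 1, y, d)
        else some (x - 1, y, d)
    else if d = "^" then
      match PySem.List.pyGet? ly 0 with
      | none => none
      | some m0 =>
        if y - 1 = m0 then
          match PySem.List.pyGet? ly 1 with
          | none => none
          | some m1 => some (x, m1 - 1, d)
        else some (x, y - 1, d)
    else if d = "v" then
      match PySem.List.pyGet? ly 1 with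
      | none => none
      | some m1 =>
        if y + 1 = m1 then
          match PySem.List.pyGet? ly 0 with
          | none => none
          | some m0 => some (x, m0 + 1, d)
        else some (x, y + 1, d)
    else some (x, y, d)

def moveA (coords : List (Int × Int × String)) (lx ly : List Int) :
    Option (List (Int × Int × String)) :=
  coords.mapM (stepA lx ly)

-- A's `while True` loop; fuel only makes the recursion total (it is never
-- exhausted on inputs satisfying Pre_); none from moveA = Python raising
def loopA (lx ly : List Int) : Nat → List (Int × Int × String) →
    List (List (Int × Int × String)) → List (List (Int × Int × String))
  | 0, _, s => s
  | fuel + 1, coords, s =>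
    match moveA coords lx ly with
    | none => s
    | some c => if c ∈ s then s else loopA lx ly fuel c (s ++ [c])

def all_states (coords : List (Int × Int × String)) (lx : List Int) (ly : List Int) :
    List (List (Int × Int × String)) :=
  loopA lx ly (pvFuel coords lx ly) coords [coords]

-- ===== PORT B =====
-- one blizzard step of B's `move` (modular arithmetic); none = IndexError / ZeroDivisionError
def stepB (lx ly : List Int) (c : Int × Int × String) : Option (Int × Int × String) :=
  match c with
  | (x, y, d) =>
    if d = ">" ∨ d = "<" then
      match PySem.List.pyGet? lx 1 with
      | none => none
      | some l1 =>
        match PySem.List.pyGet? lx 0 with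
        | none => none
        | some l0 =>
          if l1 - l0 - 1 = 0 then none
          else some (PySem.Int.mod (x - l0 - 1 + (if d = ">" then 1 else -1)) (l1 - l0 - 1) + l0 + 1, y, d)
    else if d = "^" ∨ d = "v" then
      match PySem.List.pyGet? ly 1 with
      | none => none
      | some m1 =>
        match PySem.List.pyGet? ly 0 with
        | none => none
        | some m0 =>
          if m1 - m0 - 1 = 0 then none
          else some (x, PySem.Int.mod (y - m0 - 1 + (if d = "v" then 1 else -1)) (m1 - m0 - 1) + m0 + 1, d)
    else some (x, y, d)

def moveB (coords : List (Int × Int × String)) (lx ly : List Int) :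
    Option (List (Int × Int × String)) :=
  coords.mapM (stepB lx ly)

-- B's `while c != coords` loop; fuel is the same totality device as in loopA
def loopB (lx ly : List Int) (c0 : List (Int × Int × String)) :
    Nat → List (Int × Int × String) →
    List (List (Int × Int × String)) → List (List (Int × Int × String))
  | 0, _, acc => acc
  | fuel + 1, c, acc =>
    if c = c0 then acc
    else
      match moveB c lx ly with
      | none => acc
      | some c' => loopB lx ly c0 fuel c' (acc ++ [c])

def all_states_alt (coords : List (Int × Int × String)) (lx : List Int) (ly : List Int) :
    List (List (Int × Int × String)) :=
  match moveB coords lx ly with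
  | none => [coords]
  | some c => loopB lx ly coords (pvFuel coords lx ly) c [coords]

-- ===== PRECONDITION & SPEC =====
-- Pre_ keeps every blizzard strictly inside its walls (the puzzle's domain). It excludes inputs
-- where A raises (wall list too short) or never returns, and the degenerate on/outside-wall starts
-- on which A's orbit is rho-shaped: there A happens to return while B's own loop never sees the
-- initial state again and diverges.
abbrev PreC (lx ly : List Int) (c : Int × Int × String) : Prop :=
  ((c.2.2 = ">" ∨ c.2.2 = "<") →
    2 ≤ lx.length ∧ lx.getD 0 0 < c.1 ∧ c.1 < lx.getD 1 0) ∧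
  ((c.2.2 = "^" ∨ c.2.2 = "v") →
    2 ≤ ly.length ∧ ly.getD 0 0 < c.2.1 ∧ c.2.1 < ly.getD 1 0)

def Pre_all_states (coords : List (Int × Int × String)) (lx : List Int) (ly : List Int) : Prop :=
  ∀ c ∈ coords, PreC lx ly c
instance (coords : List (Int × Int × String)) (lx : List Int) (ly : List Int) : Decidable (Pre_all_states coords lx ly) := by unfold Pre_all_states; infer_instance

def pvWitness_all_states : (List (Int × Int × String)) × List Int × List Int :=
  ([(1, 1, ">"), (2, 1, "v")], [0, 3], [0, 3])

def Spec_all_states (coords : List (Int × Int × String)) (lx : List Int) (ly : List Int) (out : List (List (Int × Int × String))) : Prop := out = all_states_alt coords lx ly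
instance (coords : List (Int × Int × String)) (lx : List Int) (ly : List Int) (out : List (List (Int × Int × String))) : Decidable (Spec_all_states coords lx ly out) := by unfold Spec_all_states; infer_instance

-- ===== CLAIM (what is proved, stated in full; the proofs are below) =====
def Claim_equal_all_states : Prop := ∀ (coords : List (Int × Int × String)) (lx : List Int) (ly : List Int), Dom_all_states coords lx ly → Pre_all_states coords lx ly → Spec_all_states coords lx ly (all_states coords lx ly)

-- ===== LEMMAS AND PROOFS =====

-- the cyclic successor on the open interval (lo, hi), step s
def cyc (lo hi s x : Int) : Int := (x - lo - 1 + s) % (hi - lo - 1) + lo + 1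

-- the (total) blizzard step used by the proofs: on Pre_ states it is what both moves compute
def pnext (lx ly : List Int) (c : Int × Int × String) : Int × Int × String :=
  match c with
  | (x, y, d) =>
    if d = ">" then (cyc (lx.getD 0 0) (lx.getD 1 0) 1 x, y, d)
    else if d = "<" then (cyc (lx.getD 0 0) (lx.getD 1 0) (-1) x, y, d)
    else if d = "^" then (x, cyc (ly.getD 0 0) (ly.getD 1 0) (-1) y, d)
    else if d = "v" then (x, cyc (ly.getD 0 0) (ly.getD 1 0) 1 y, d)
    else c

def pback (lx ly : List Int) (c : Int × Int × String) : Int × Int × String :=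
  match c with
  | (x, y, d) =>
    if d = ">" then (cyc (lx.getD 0 0) (lx.getD 1 0) (-1) x, y, d)
    else if d = "<" then (cyc (lx.getD 0 0) (lx.getD 1 0) 1 x, y, d)
    else if d = "^" then (x, cyc (ly.getD 0 0) (ly.getD 1 0) 1 y, d)
    else if d = "v" then (x, cyc (ly.getD 0 0) (ly.getD 1 0) (-1) y, d)
    else c

def pmove (lx ly : List Int) (cs : List (Int × Int × String)) : List (Int × Int × String) :=
  cs.map (pnext lx ly)

lemma cyc_bounds (lo hi s x : Int) (h : lo < x ∧ x < hi) : lo < cyc lo hi s x ∧ cyc lo hi s x < hi := by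
  unfold cyc
  have hw : 0 < hi - lo - 1 := by omega
  have h1 := Int.emod_nonneg (x - lo - 1 + s) (by omega : hi - lo - 1 ≠ 0)
  have h2 := Int.emod_lt_of_pos (x - lo - 1 + s) hw
  omega

lemma cyc_back (lo hi s x : Int) (h : lo < x ∧ x < hi) : cyc lo hi (-s) (cyc lo hi s x) = x := by
  unfold cyc
  have hw : 0 < hi - lo - 1 := by omega
  have : (x - lo - 1 + s) % (hi - lo - 1) + lo + 1 - lo - 1 + -s
       = (x - lo - 1 + s) % (hi - lo - 1) + -s := by ring
  rw [this, Int.emod_add_emod, show x - lo - 1 + s + -s = x - lo - 1 by ring,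
    Int.emod_eq_of_lt (by omega) (by omega)]
  omega

lemma cyc_iter (lo hi s x : Int) (h : lo < x ∧ x < hi) (k : Nat) :
    (cyc lo hi s)^[k] x = (x - lo - 1 + k * s) % (hi - lo - 1) + lo + 1 := by
  induction k with
  | zero =>
      simp only [Function.iterate_zero_apply, Nat.cast_zero, zero_mul, add_zero]
      rw [Int.emod_eq_of_lt (by omega) (by omega)]
      omega
  | succ k ih =>
      rw [Function.iterate_succ_apply', ih]
      unfold cyc
      have : (x - lo - 1 + k * s) % (hi - lo - 1) + lo + 1 - lo - 1 + s
           = (x - lo - 1 + k * s) % (hi - lo - 1) + s := by ring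
      rw [this, Int.emod_add_emod]
      have h5 : x - lo - 1 + (k : Int) * s + s = x - lo - 1 + ((k + 1 : Nat) : Int) * s := by
        push_cast
        ring
      rw [h5]

lemma cyc_period (lo hi s x : Int) (h : lo < x ∧ x < hi) (k : Nat)
    (hd : (hi - lo - 1).toNat ∣ k) : (cyc lo hi s)^[k] x = x := by
  rw [cyc_iter lo hi s x h k]
  have hw : 0 < hi - lo - 1 := by omega
  have hdz : (hi - lo - 1) ∣ (k : Int) := by
    have h2 := Int.natCast_dvd_natCast.mpr hd
    rwa [Int.toNat_of_nonneg (by omega)] at h2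
  rcases hdz.mul_right s with ⟨u, hu⟩
  rw [show x - lo - 1 + (k:Int) * s = x - lo - 1 + (hi - lo - 1) * u by omega,
    Int.add_mul_emod_self_left, Int.emod_eq_of_lt (by omega) (by omega)]
  omega

lemma pyGetIdx (lx : List Int) (n : Nat) (h : n < lx.length) :
    PySem.List.pyGet? lx (n : Int) = some (lx.getD n 0) := by
  rw [PySem.List.pyGet?_natCast, List.getD_eq_getElem lx 0 h, List.getElem?_eq_getElem h]

lemma pyGet0 (lx : List Int) (h : 0 < lx.length) : PySem.List.pyGet? lx 0 = some (lx.getD 0 0) :=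
  pyGetIdx lx 0 h

lemma pyGet1 (lx : List Int) (h : 1 < lx.length) : PySem.List.pyGet? lx 1 = some (lx.getD 1 0) :=
  pyGetIdx lx 1 h

lemma cyc_one (lo hi x : Int) (h : lo < x ∧ x < hi) :
    cyc lo hi 1 x = if x + 1 = hi then lo + 1 else x + 1 := by
  unfold cyc
  by_cases hc : x + 1 = hi
  · rw [if_pos hc, show x - lo - 1 + 1 = hi - lo - 1 by omega, Int.emod_self]
    omega
  · rw [if_neg hc, Int.emod_eq_of_lt (by omega) (by omega)]
    omega

lemma cyc_neg_one (lo hi x : Int) (h : lo < x ∧ x < hi) :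
    cyc lo hi (-1) x = if x - 1 = lo then hi - 1 else x - 1 := by
  unfold cyc
  by_cases hc : x - 1 = lo
  · have hm : (-1 : Int) % (hi - lo - 1) = hi - lo - 1 - 1 := by
      rw [show (-1:Int) = (hi - lo - 1 - 1) + (hi - lo - 1) * (-1) by ring,
        Int.add_mul_emod_self_left, Int.emod_eq_of_lt (by omega) (by omega)]
    rw [if_pos hc, show x - lo - 1 + -1 = -1 by omega, hm]
    omega
  · rw [if_neg hc, Int.emod_eq_of_lt (by omega) (by omega)]
    omega

-- stepA computes pnext on Pre_ coordinates
lemma stepA_eq (lx ly : List Int) (c : Int × Int × String) (h : PreC lx ly c) :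
    stepA lx ly c = some (pnext lx ly c) := by
  obtain ⟨x, y, d⟩ := c
  by_cases h1 : d = ">"
  · obtain ⟨hlen, hx1, hx2⟩ := h.1 (Or.inl h1)
    subst h1
    simp only [stepA, pnext, if_true]
    rw [pyGet1 lx (by omega), pyGet0 lx (by omega)]
    simp only [cyc_one (lx.getD 0 0) (lx.getD 1 0) x ⟨hx1, hx2⟩]
    by_cases hc : x + 1 = lx.getD 1 0
    · rw [if_pos hc, if_pos hc]
    · rw [if_neg hc, if_neg hc]
  · by_cases h2 : d = "<"
    · obtain ⟨hlen, hx1, hx2⟩ := h.1 (Or.inr h2)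
      subst h2
      simp only [stepA, pnext, if_neg h1, if_true]
      rw [pyGet0 lx (by omega), pyGet1 lx (by omega)]
      simp only [cyc_neg_one (lx.getD 0 0) (lx.getD 1 0) x ⟨hx1, hx2⟩]
      by_cases hc : x - 1 = lx.getD 0 0
      · rw [if_pos hc, if_pos hc]
      · rw [if_neg hc, if_neg hc]
    · by_cases h3 : d = "^"
      · obtain ⟨hlen, hy1, hy2⟩ := h.2 (Or.inl h3)
        subst h3
        simp only [stepA, pnext, if_neg h1, if_neg h2, if_true]
        rw [pyGet0 ly (by omega), pyGet1 ly (by omega)]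
        simp only [cyc_neg_one (ly.getD 0 0) (ly.getD 1 0) y ⟨hy1, hy2⟩]
        by_cases hc : y - 1 = ly.getD 0 0
        · rw [if_pos hc, if_pos hc]
        · rw [if_neg hc, if_neg hc]
      · by_cases h4 : d = "v"
        · obtain ⟨hlen, hy1, hy2⟩ := h.2 (Or.inr h4)
          subst h4
          simp only [stepA, pnext, if_neg h1, if_neg h2, if_neg h3, if_true]
          rw [pyGet1 ly (by omega), pyGet0 ly (by omega)]
          simp only [cyc_one (ly.getD 0 0) (ly.getD 1 0) y ⟨hy1, hy2⟩]
          by_cases hc : y + 1 = ly.getD 1 0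
          · rw [if_pos hc, if_pos hc]
          · rw [if_neg hc, if_neg hc]
        · simp only [stepA, pnext, if_neg h1, if_neg h2, if_neg h3, if_neg h4]

-- stepB computes pnext on Pre_ coordinates
lemma stepB_eq (lx ly : List Int) (c : Int × Int × String) (h : PreC lx ly c) :
    stepB lx ly c = some (pnext lx ly c) := by
  obtain ⟨x, y, d⟩ := c
  by_cases h1 : d = ">"
  · obtain ⟨hlen, hx1, hx2⟩ := h.1 (Or.inl h1)
    subst h1
    simp only [stepB, pnext, if_true]
    rw [pyGet1 lx (by omega), pyGet0 lx (by omega)]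
    simp only [if_neg (show ¬(lx.getD 1 0 - lx.getD 0 0 - 1 = 0) by omega),]
    rw [PySem.Int.mod_eq_emod_of_pos (by omega)]
    rfl
  · by_cases h2 : d = "<"
    · obtain ⟨hlen, hx1, hx2⟩ := h.1 (Or.inr h2)
      subst h2
      simp only [stepB, pnext, if_neg h1, if_true]
      rw [pyGet1 lx (by omega), pyGet0 lx (by omega)]
      simp only [if_neg (show ¬(lx.getD 1 0 - lx.getD 0 0 - 1 = 0) by omega)]
      rw [PySem.Int.mod_eq_emod_of_pos (by omega)]
      rfl
    · by_cases h3 : d = "^"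
      · obtain ⟨hlen, hy1, hy2⟩ := h.2 (Or.inl h3)
        subst h3
        have hor : ¬(("^":String) = ">" ∨ ("^":String) = "<") := by decide
        simp only [stepB, pnext, if_neg h1, if_neg h2, if_neg hor, if_true]
        rw [pyGet1 ly (by omega), pyGet0 ly (by omega)]
        simp only [if_neg (show ¬(ly.getD 1 0 - ly.getD 0 0 - 1 = 0) by omega)]
        rw [PySem.Int.mod_eq_emod_of_pos (by omega)]
        rfl
      · by_cases h4 : d = "v"
        · obtain ⟨hlen, hy1, hy2⟩ := h.2 (Or.inr h4)
          subst h4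
          have hor : ¬(("v":String) = ">" ∨ ("v":String) = "<") := by decide
          simp only [stepB, pnext, if_neg h1, if_neg h2, if_neg h3, if_neg hor, if_true]
          rw [pyGet1 ly (by omega), pyGet0 ly (by omega)]
          simp only [if_neg (show ¬(ly.getD 1 0 - ly.getD 0 0 - 1 = 0) by omega)]
          rw [PySem.Int.mod_eq_emod_of_pos (by omega)]
          rfl
        · have hor1 : ¬(d = ">" ∨ d = "<") := by
            intro hcon; rcases hcon with h | h <;> [exact h1 h; exact h2 h]
          have hor2 : ¬(d = "^" ∨ d = "v") := by
            intro hcon; rcases hcon with h | h <;> [exact h3 h; exact h4 h]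
          simp only [stepB, pnext, if_neg hor1, if_neg hor2, if_neg h1, if_neg h2, if_neg h3, if_neg h4]

lemma pnext_pre (lx ly : List Int) (c : Int × Int × String) (h : PreC lx ly c) :
    PreC lx ly (pnext lx ly c) := by
  obtain ⟨x, y, d⟩ := c
  by_cases h1 : d = ">"
  · obtain ⟨hlen, hx1, hx2⟩ := h.1 (Or.inl h1)
    subst h1
    have hb := cyc_bounds (lx.getD 0 0) (lx.getD 1 0) 1 x ⟨hx1, hx2⟩
    simp only [pnext, if_true]
    exact ⟨fun _ => ⟨hlen, hb.1, hb.2⟩, fun hcon => by rcases hcon with h | h <;> simp at h⟩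
  · by_cases h2 : d = "<"
    · obtain ⟨hlen, hx1, hx2⟩ := h.1 (Or.inr h2)
      subst h2
      have hb := cyc_bounds (lx.getD 0 0) (lx.getD 1 0) (-1) x ⟨hx1, hx2⟩
      simp only [pnext, if_neg h1, if_true]
      exact ⟨fun _ => ⟨hlen, hb.1, hb.2⟩, fun hcon => by rcases hcon with h | h <;> simp at h⟩
    · by_cases h3 : d = "^"
      · obtain ⟨hlen, hy1, hy2⟩ := h.2 (Or.inl h3)
        subst h3
        have hb := cyc_bounds (ly.getD 0 0) (ly.getD 1 0) (-1) y ⟨hy1, hy2⟩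
        simp only [pnext, if_neg h1, if_neg h2, if_true]
        exact ⟨fun hcon => by rcases hcon with h | h <;> simp at h, fun _ => ⟨hlen, hb.1, hb.2⟩⟩
      · by_cases h4 : d = "v"
        · obtain ⟨hlen, hy1, hy2⟩ := h.2 (Or.inr h4)
          subst h4
          have hb := cyc_bounds (ly.getD 0 0) (ly.getD 1 0) 1 y ⟨hy1, hy2⟩
          simp only [pnext, if_neg h1, if_neg h2, if_neg h3, if_true]
          exact ⟨fun hcon => by rcases hcon with h | h <;> simp at h, fun _ => ⟨hlen, hb.1, hb.2⟩⟩
        · simpa only [pnext, if_neg h1, if_neg h2, if_neg h3, if_neg h4] using h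

lemma pback_pnext (lx ly : List Int) (c : Int × Int × String) (h : PreC lx ly c) :
    pback lx ly (pnext lx ly c) = c := by
  obtain ⟨x, y, d⟩ := c
  by_cases h1 : d = ">"
  · obtain ⟨hlen, hx1, hx2⟩ := h.1 (Or.inl h1)
    subst h1
    have hp : pnext lx ly (x, y, ">") = (cyc (lx.getD 0 0) (lx.getD 1 0) 1 x, y, ">") := by
      simp only [pnext, if_true]
    rw [hp]
    simp only [pback, if_true]
    rw [cyc_back (lx.getD 0 0) (lx.getD 1 0) 1 x ⟨hx1, hx2⟩]
  · by_cases h2 : d = "<"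
    · obtain ⟨hlen, hx1, hx2⟩ := h.1 (Or.inr h2)
      subst h2
      have hp : pnext lx ly (x, y, "<") = (cyc (lx.getD 0 0) (lx.getD 1 0) (-1) x, y, "<") := by
        simp only [pnext, if_neg h1, if_true]
      rw [hp]
      simp only [pback, if_neg h1, if_true]
      have hb := cyc_back (lx.getD 0 0) (lx.getD 1 0) (-1) x ⟨hx1, hx2⟩
      rw [neg_neg] at hb
      rw [hb]
    · by_cases h3 : d = "^"
      · obtain ⟨hlen, hy1, hy2⟩ := h.2 (Or.inl h3)
        subst h3
        have hp : pnext lx ly (x, y, "^") = (x, cyc (ly.getD 0 0) (ly.getD 1 0) (-1) y, "^") := by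
          simp only [pnext, if_neg h1, if_neg h2, if_true]
        rw [hp]
        simp only [pback, if_neg h1, if_neg h2, if_true]
        have hb := cyc_back (ly.getD 0 0) (ly.getD 1 0) (-1) y ⟨hy1, hy2⟩
        rw [neg_neg] at hb
        rw [hb]
      · by_cases h4 : d = "v"
        · obtain ⟨hlen, hy1, hy2⟩ := h.2 (Or.inr h4)
          subst h4
          have hp : pnext lx ly (x, y, "v") = (x, cyc (ly.getD 0 0) (ly.getD 1 0) 1 y, "v") := by
            simp only [pnext, if_neg h1, if_neg h2, if_neg h3, if_true]
          rw [hp]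
          simp only [pback, if_neg h1, if_neg h2, if_neg h3, if_true]
          rw [cyc_back (ly.getD 0 0) (ly.getD 1 0) 1 y ⟨hy1, hy2⟩]
        · have hp : pnext lx ly (x, y, d) = (x, y, d) := by
            simp only [pnext, if_neg h1, if_neg h2, if_neg h3, if_neg h4]
          rw [hp]
          simp only [pback, if_neg h1, if_neg h2, if_neg h3, if_neg h4]

lemma pnext_iter_gt (lx ly : List Int) (x y : Int) (k : Nat) :
    (pnext lx ly)^[k] (x, y, ">") = ((cyc (lx.getD 0 0) (lx.getD 1 0) 1)^[k] x, y, ">") := by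
  induction k with
  | zero => rfl
  | succ k ih => rw [Function.iterate_succ_apply', Function.iterate_succ_apply', ih]; rfl

lemma pnext_iter_lt (lx ly : List Int) (x y : Int) (k : Nat) :
    (pnext lx ly)^[k] (x, y, "<") = ((cyc (lx.getD 0 0) (lx.getD 1 0) (-1))^[k] x, y, "<") := by
  induction k with
  | zero => rfl
  | succ k ih => rw [Function.iterate_succ_apply', Function.iterate_succ_apply', ih]; rfl

lemma pnext_iter_up (lx ly : List Int) (x y : Int) (k : Nat) :
    (pnext lx ly)^[k] (x, y, "^") = (x, (cyc (ly.getD 0 0) (ly.getD 1 0) (-1))^[k] y, "^") := by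
  induction k with
  | zero => rfl
  | succ k ih => rw [Function.iterate_succ_apply', Function.iterate_succ_apply', ih]; rfl

lemma pnext_iter_dn (lx ly : List Int) (x y : Int) (k : Nat) :
    (pnext lx ly)^[k] (x, y, "v") = (x, (cyc (ly.getD 0 0) (ly.getD 1 0) 1)^[k] y, "v") := by
  induction k with
  | zero => rfl
  | succ k ih => rw [Function.iterate_succ_apply', Function.iterate_succ_apply', ih]; rfl

lemma pnext_period (lx ly : List Int) (c : Int × Int × String) (h : PreC lx ly c) (k : Nat)
    (hd : szC lx ly c ∣ k) : (pnext lx ly)^[k] c = c := by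
  obtain ⟨x, y, d⟩ := c
  by_cases h1 : d = ">"
  · obtain ⟨hlen, hx1, hx2⟩ := h.1 (Or.inl h1)
    subst h1
    rw [pnext_iter_gt, cyc_period (lx.getD 0 0) (lx.getD 1 0) 1 x ⟨hx1, hx2⟩ k
      (by simpa [szC] using hd)]
  · by_cases h2 : d = "<"
    · obtain ⟨hlen, hx1, hx2⟩ := h.1 (Or.inr h2)
      subst h2
      rw [pnext_iter_lt, cyc_period (lx.getD 0 0) (lx.getD 1 0) (-1) x ⟨hx1, hx2⟩ k
        (by simpa [szC] using hd)]
    · by_cases h3 : d = "^"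
      · obtain ⟨hlen, hy1, hy2⟩ := h.2 (Or.inl h3)
        subst h3
        rw [pnext_iter_up, cyc_period (ly.getD 0 0) (ly.getD 1 0) (-1) y ⟨hy1, hy2⟩ k
          (by simpa [szC] using hd)]
      · by_cases h4 : d = "v"
        · obtain ⟨hlen, hy1, hy2⟩ := h.2 (Or.inr h4)
          subst h4
          rw [pnext_iter_dn, cyc_period (ly.getD 0 0) (ly.getD 1 0) 1 y ⟨hy1, hy2⟩ k
            (by simpa [szC] using hd)]
        · have hfix : pnext lx ly (x, y, d) = (x, y, d) := by
            simp only [pnext, if_neg h1, if_neg h2, if_neg h3, if_neg h4]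
          exact Function.iterate_fixed hfix k

lemma moveA_eq (lx ly : List Int) (cs : List (Int × Int × String))
    (hs : ∀ c ∈ cs, PreC lx ly c) : moveA cs lx ly = some (pmove lx ly cs) := by
  induction cs with
  | nil => rfl
  | cons a t ih =>
      have ht := ih (fun c hc => hs c (List.mem_cons_of_mem a hc))
      simp only [moveA] at ht ⊢
      rw [List.mapM_cons, stepA_eq lx ly a (hs a List.mem_cons_self), ht]
      rfl

lemma moveB_eq (lx ly : List Int) (cs : List (Int × Int × String))
    (hs : ∀ c ∈ cs, PreC lx ly c) : moveB cs lx ly = some (pmove lx ly cs) := by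
  induction cs with
  | nil => rfl
  | cons a t ih =>
      have ht := ih (fun c hc => hs c (List.mem_cons_of_mem a hc))
      simp only [moveB] at ht ⊢
      rw [List.mapM_cons, stepB_eq lx ly a (hs a List.mem_cons_self), ht]
      rfl

lemma pmove_pre (lx ly : List Int) (cs : List (Int × Int × String))
    (hs : ∀ c ∈ cs, PreC lx ly c) : ∀ c ∈ pmove lx ly cs, PreC lx ly c := by
  intro c hc
  obtain ⟨a, ha, rfl⟩ := List.mem_map.mp hc
  exact pnext_pre lx ly a (hs a ha)

lemma orbit_pre (lx ly : List Int) (cs : List (Int × Int × String))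
    (hs : ∀ c ∈ cs, PreC lx ly c) (k : Nat) :
    ∀ c ∈ (pmove lx ly)^[k] cs, PreC lx ly c := by
  induction k with
  | zero => exact hs
  | succ k ih => rw [Function.iterate_succ_apply']; exact pmove_pre lx ly _ ih

lemma pmove_iter (lx ly : List Int) (cs : List (Int × Int × String)) (k : Nat) :
    (pmove lx ly)^[k] cs = cs.map ((pnext lx ly)^[k]) := by
  induction k with
  | zero => simp
  | succ k ih =>
      rw [Function.iterate_succ_apply', ih]
      simp only [pmove, List.map_map]
      rw [Function.iterate_succ']

lemma szC_pos (lx ly : List Int) (c : Int × Int × String) (h : PreC lx ly c) :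
    0 < szC lx ly c := by
  unfold szC
  split_ifs with ha hb
  · obtain ⟨_, h1, h2⟩ := h.1 ha
    omega
  · obtain ⟨_, h1, h2⟩ := h.2 hb
    omega
  · norm_num

lemma orbit_prod (lx ly : List Int) (cs : List (Int × Int × String))
    (hs : ∀ c ∈ cs, PreC lx ly c) :
    (pmove lx ly)^[(cs.map (szC lx ly)).prod] cs = cs := by
  rw [pmove_iter]
  have : ∀ a ∈ cs, (pnext lx ly)^[(cs.map (szC lx ly)).prod] a = id a := by
    intro a ha
    exact pnext_period lx ly a (hs a ha) _ (List.dvd_prod (List.mem_map_of_mem ha))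
  rw [List.map_congr_left this, List.map_id]

lemma map_pback (lx ly : List Int) (cs : List (Int × Int × String))
    (hs : ∀ c ∈ cs, PreC lx ly c) : (pmove lx ly cs).map (pback lx ly) = cs := by
  simp only [pmove, List.map_map]
  have h2 : ∀ a ∈ cs, (pback lx ly ∘ pnext lx ly) a = id a :=
    fun a ha => pback_pnext lx ly a (hs a ha)
  rw [List.map_congr_left h2, List.map_id]

lemma pmove_inj (lx ly : List Int) (a b : List (Int × Int × String))
    (ha : ∀ c ∈ a, PreC lx ly c) (hb : ∀ c ∈ b, PreC lx ly c)
    (h : pmove lx ly a = pmove lx ly b) : a = b := by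
  rw [← map_pback lx ly a ha, ← map_pback lx ly b hb, h]

lemma iter_inj (lx ly : List Int) (k : Nat) (a b : List (Int × Int × String))
    (ha : ∀ c ∈ a, PreC lx ly c) (hb : ∀ c ∈ b, PreC lx ly c)
    (h : (pmove lx ly)^[k] a = (pmove lx ly)^[k] b) : a = b := by
  induction k generalizing a b with
  | zero => exact h
  | succ k ih =>
      have := ih (pmove lx ly a) (pmove lx ly b)
        (pmove_pre lx ly a ha) (pmove_pre lx ly b hb)
        (by rwa [← Function.iterate_succ_apply, ← Function.iterate_succ_apply])
      exact pmove_inj lx ly a b ha hb this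

lemma loopA_some (lx ly : List Int) (fuel : Nat) (cur c : List (Int × Int × String))
    (s : List (List (Int × Int × String))) (h : moveA cur lx ly = some c) :
    loopA lx ly (fuel+1) cur s = if c ∈ s then s else loopA lx ly fuel c (s ++ [c]) := by
  rw [loopA, h]

lemma loopB_stop (lx ly : List Int) (c0 : List (Int × Int × String)) (fuel : Nat)
    (acc : List (List (Int × Int × String))) :
    loopB lx ly c0 (fuel+1) c0 acc = acc := by
  rw [loopB, if_pos rfl]

lemma loopB_some (lx ly : List Int) (c0 c c' : List (Int × Int × String)) (fuel : Nat)
    (acc : List (List (Int × Int × String))) (h : c ≠ c0) (hm : moveB c lx ly = some c') :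
    loopB lx ly c0 (fuel+1) c acc = loopB lx ly c0 fuel c' (acc ++ [c]) := by
  rw [loopB, if_neg h, hm]

lemma loopA_run (lx ly : List Int) (c0 : List (Int × Int × String))
    (h0 : ∀ c ∈ c0, PreC lx ly c) (p : Nat)
    (hret : (pmove lx ly)^[p] c0 = c0)
    (hdist : ∀ i j, i < j → j < p → (pmove lx ly)^[i] c0 ≠ (pmove lx ly)^[j] c0) :
    ∀ fuel k, 1 ≤ k → k ≤ p → p - k < fuel →
      loopA lx ly fuel ((pmove lx ly)^[k-1] c0)
          ((List.range k).map (fun i => (pmove lx ly)^[i] c0))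
        = (List.range p).map (fun i => (pmove lx ly)^[i] c0) := by
  intro fuel
  induction fuel with
  | zero => intro k h1 h2 h3; omega
  | succ fuel ih =>
      intro k h1 h2 h3
      have hstep : pmove lx ly ((pmove lx ly)^[k-1] c0) = (pmove lx ly)^[k] c0 := by
        have h4 := Function.iterate_succ_apply' (pmove lx ly) (k-1) c0
        rw [show (k - 1).succ = k by omega] at h4
        exact h4.symm
      rw [loopA_some lx ly fuel _ _ _
        (by rw [moveA_eq lx ly _ (orbit_pre lx ly c0 h0 (k-1)), hstep])]
      by_cases hk : k = p
      · subst hk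
        rw [if_pos (by rw [hret]; exact List.mem_map.mpr ⟨0, List.mem_range.mpr (by omega), rfl⟩)]
      · have hlt : k < p := by omega
        have hnm : (pmove lx ly)^[k] c0 ∉ (List.range k).map (fun i => (pmove lx ly)^[i] c0) := by
          intro hm
          obtain ⟨i, hi, heq⟩ := List.mem_map.mp hm
          exact hdist i k (List.mem_range.mp hi) hlt heq
        rw [if_neg hnm]
        have hacc : (List.range k).map (fun i => (pmove lx ly)^[i] c0) ++ [(pmove lx ly)^[k] c0]
            = (List.range (k+1)).map (fun i => (pmove lx ly)^[i] c0) := by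
          rw [List.range_succ, List.map_append]
          rfl
        rw [hacc]
        exact ih (k+1) (by omega) (by omega) (by omega)

lemma loopB_run (lx ly : List Int) (c0 : List (Int × Int × String))
    (h0 : ∀ c ∈ c0, PreC lx ly c) (p : Nat)
    (hret : (pmove lx ly)^[p] c0 = c0)
    (hdist : ∀ i j, i < j → j < p → (pmove lx ly)^[i] c0 ≠ (pmove lx ly)^[j] c0) :
    ∀ fuel k, 1 ≤ k → k ≤ p → p - k < fuel →
      loopB lx ly c0 fuel ((pmove lx ly)^[k] c0)
          ((List.range k).map (fun i => (pmove lx ly)^[i] c0))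
        = (List.range p).map (fun i => (pmove lx ly)^[i] c0) := by
  intro fuel
  induction fuel with
  | zero => intro k h1 h2 h3; omega
  | succ fuel ih =>
      intro k h1 h2 h3
      by_cases hk : k = p
      · subst hk
        rw [hret, loopB_stop]
      · have hlt : k < p := by omega
        have hne : (pmove lx ly)^[k] c0 ≠ c0 := fun hm =>
          hdist 0 k (by omega) hlt hm.symm
        have hstep : pmove lx ly ((pmove lx ly)^[k] c0) = (pmove lx ly)^[k+1] c0 :=
          (Function.iterate_succ_apply' (pmove lx ly) k c0).symm
        rw [loopB_some lx ly c0 _ _ fuel _ hne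
          (by rw [moveB_eq lx ly _ (orbit_pre lx ly c0 h0 k), hstep])]
        have hacc : (List.range k).map (fun i => (pmove lx ly)^[i] c0) ++ [(pmove lx ly)^[k] c0]
            = (List.range (k+1)).map (fun i => (pmove lx ly)^[i] c0) := by
          rw [List.range_succ, List.map_append]
          rfl
        rw [hacc]
        exact ih (k+1) (by omega) (by omega) (by omega)

-- ===== VERDICT (by name: the statement is the Claim_ definition above) =====
theorem all_states_spec : Claim_equal_all_states := by
  intro coords lx ly hdom hpre
  unfold Spec_all_states
  have hpre' : ∀ c ∈ coords, PreC lx ly c := hpre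
  have hKpos : 0 < (coords.map (szC lx ly)).prod := List.prod_pos (by
    intro a ha
    obtain ⟨c, hc, rfl⟩ := List.mem_map.mp ha
    exact szC_pos lx ly c (hpre' c hc))
  have hex : ∃ k, 0 < k ∧ (pmove lx ly)^[k] coords = coords :=
    ⟨(coords.map (szC lx ly)).prod, hKpos, orbit_prod lx ly coords hpre'⟩
  have hp0 : 0 < Nat.find hex := (Nat.find_spec hex).1
  have hpret : (pmove lx ly)^[Nat.find hex] coords = coords := (Nat.find_spec hex).2
  have hple : Nat.find hex ≤ (coords.map (szC lx ly)).prod :=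
    Nat.find_min' hex ⟨hKpos, orbit_prod lx ly coords hpre'⟩
  have hdist : ∀ i j, i < j → j < Nat.find hex →
      (pmove lx ly)^[i] coords ≠ (pmove lx ly)^[j] coords := by
    intro i j hij hjp heq
    rw [show j = i + (j - i) by omega, Function.iterate_add_apply] at heq
    have h2 := iter_inj lx ly i coords ((pmove lx ly)^[j-i] coords) hpre'
      (orbit_pre lx ly coords hpre' (j-i)) heq
    exact Nat.find_min hex (show j - i < Nat.find hex by omega) ⟨by omega, h2.symm⟩
  have hA := loopA_run lx ly coords hpre' (Nat.find hex) hpret hdist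
    (pvFuel coords lx ly) 1 le_rfl hp0 (by unfold pvFuel; omega)
  have hB := loopB_run lx ly coords hpre' (Nat.find hex) hpret hdist
    (pvFuel coords lx ly) 1 le_rfl hp0 (by unfold pvFuel; omega)
  rw [all_states]
  rw [show all_states_alt coords lx ly
      = loopB lx ly coords (pvFuel coords lx ly) (pmove lx ly coords) [coords] by
    rw [all_states_alt, moveB_eq lx ly coords hpre']]
  simp only [List.range_one, List.map_cons, List.map_nil, Function.iterate_one,
    Function.iterate_zero_apply] at hA hB
  rw [← hB] at hA
  exact hA
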